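-- pv_equiv track=rewrite | github.com/Buscedv/Ask | ask_lang/transpiler/utilities/translator_utils.py | extract_params_from_uri
-- ===== SOURCE A (Python) =====
-- def extract_params_from_uri(route_path: str) -> str:
-- 	is_param = False
-- 	tmp = ''
-- 	params_str = ''
--
-- 	for char in route_path:
-- 		if char == '<':
-- 			tmp = ''
-- 			is_param = True
-- 		elif char == '>':
-- 			is_param = False
-- 			if tmp:
-- 				params_str += f'{tmp}, '
-- 				tmp = ''
-- 		elif is_param and char not in [' ' + '\t', '\n']:
-- 			tmp += char
--
-- 	if len(params_str) > 2 and params_str[-2:] == ', ':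
-- 		params_str = params_str[:-2]
--
-- 	return params_str
-- ===== SOURCE B (Python) =====
-- def extract_params_from_uri(route_path: str) -> str:
-- 	names = []
-- 	for seg in route_path.split('<')[1:]:
-- 		if '>' in seg:
-- 			name = seg[:seg.index('>')].replace('\n', '')
-- 			if name:
-- 				names.append(name)
-- 	return ', '.join(names)
-- ===== Notes on version B (the rewrite author's own statement) =====
-- stated objective: idiomatic
-- what changed: Replaces the character-by-character state machine (is_param flag, tmp accumulator, trailing-separator trim) with a split-based pass: split the string on the opening bracket, take each segment's text before its first closing bracket, strip newlines, drop empties and join the names with the separator.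
import Mathlib
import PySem

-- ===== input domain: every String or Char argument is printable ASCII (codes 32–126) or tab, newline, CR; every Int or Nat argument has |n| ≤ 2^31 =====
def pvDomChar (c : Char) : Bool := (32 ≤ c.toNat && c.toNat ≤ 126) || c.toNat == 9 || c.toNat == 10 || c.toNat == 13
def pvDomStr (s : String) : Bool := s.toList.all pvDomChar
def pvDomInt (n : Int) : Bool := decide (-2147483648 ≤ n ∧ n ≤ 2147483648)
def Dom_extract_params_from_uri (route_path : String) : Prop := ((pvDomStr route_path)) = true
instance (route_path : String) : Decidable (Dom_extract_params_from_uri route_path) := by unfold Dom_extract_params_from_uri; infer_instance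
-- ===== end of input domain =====

-- B replaces A's character-by-character state machine with a split('<')-based pass
-- (text before each segment's first '>', newlines removed, empties dropped, ', '-joined); same results, alternative structure.

-- ===== PORT A =====
-- the loop body of A's for-loop, as a named helper
def pvStepA (st : Bool × List Char × List Char) (char : Char) : Bool × List Char × List Char :=
  if char = '<' then (true, ([] : List Char), st.2.2)
  else if char = '>' then
    if st.2.1 ≠ [] then (false, ([] : List Char), st.2.2 ++ st.2.1 ++ [',', ' '])
    else (false, st.2.1, st.2.2)
  else if st.1 = true ∧ [char] ∉ [[' ', '\t'], ['\n']] then (st.1, st.2.1 ++ [char], st.2.2)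
  else st


-- state machine: (is_param, tmp, params_str); note A's filter list is [' \t', '\n'],
-- so as a one-char string only '\n' can match — ported literally as list-of-strings membership.
def extract_params_from_uri (route_path : String) : String :=
  let st := route_path.toList.foldl pvStepA (false, [], [])
  let params_str := st.2.2
  let params_str :=
    if 2 < params_str.length ∧ PySem.List.slice params_str (some (-2)) none = [',', ' ']
    then PySem.List.slice params_str none (some (-2)) else params_str
  String.ofList params_str

-- ===== PORT B =====
-- the loop body of B's for-loop, as a named helper
def pvStepB (names : List (List Char)) (seg : List Char) : List (List Char) :=
  if PySem.Chars.isIn ['>'] seg then             -- if '>' in seg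
    let name := PySem.Chars.replace
      (PySem.List.slice seg none (some (PySem.Chars.find seg ['>']))) ['\n'] []
    if name ≠ [] then names ++ [name] else names
  else names


def extract_params_from_uri_alt (route_path : String) : String :=
  let segs := route_path.toList.splitOn '<'         -- route_path.split('<')
  let names := (segs.drop 1).foldl pvStepB []        -- for seg in ...[1:]
  String.ofList (PySem.Chars.join [',', ' '] names)      -- ', '.join(names)

-- ===== PRECONDITION & SPEC =====
def Spec_extract_params_from_uri (route_path : String) (out : String) : Prop := out = extract_params_from_uri_alt route_path
instance (route_path : String) (out : String) : Decidable (Spec_extract_params_from_uri route_path out) := by unfold Spec_extract_params_from_uri; infer_instance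

-- ===== CLAIM (what is proved, stated in full; the proofs are below) =====
def Claim_equal_extract_params_from_uri : Prop := ∀ (route_path : String), Dom_extract_params_from_uri route_path → Spec_extract_params_from_uri route_path (extract_params_from_uri route_path)

-- ===== LEMMAS AND PROOFS =====

-- The common specification: the list of parameter-name groups A's state machine emits.
def pvParse : List Char → Bool → List Char → List (List Char)
  | [], _, _ => []
  | c :: r, b, tmp =>
    if c = '<' then pvParse r true []
    else if c = '>' then (if tmp ≠ [] then [tmp] else []) ++ pvParse r false []
    else if b ∧ c ≠ '\n' then pvParse r b (tmp ++ [c])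
    else pvParse r b tmp

def pvRender (gs : List (List Char)) : List Char := (gs.map (· ++ [',', ' '])).flatten
def pvFw (h : List Char) : List Char := (h.takeWhile (· ≠ '>')).filter (· ≠ '\n')
def pvGd (n : List Char) : List (List Char) := if n = [] then [] else [n]
def pvG (seg : List Char) : List (List Char) := if '>' ∈ seg then pvGd (pvFw seg) else []

-- ---- A side ----

theorem pvStepA_eval (b : Bool) (tmp acc : List Char) (c : Char) :
    pvStepA (b, tmp, acc) c =
      if c = '<' then (true, [], acc)
      else if c = '>' then (if tmp ≠ [] then (false, [], acc ++ tmp ++ [',', ' ']) else (false, tmp, acc))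
      else if b = true ∧ c ≠ '\n' then (b, tmp ++ [c], acc)
      else (b, tmp, acc) := by
  unfold pvStepA
  by_cases h1 : c = '<'
  · simp [h1]
  · by_cases h2 : c = '>'
    · simp [h1, h2]
    · by_cases h3 : c = '\n'
      · simp [h1, h2, h3]
      · have hm : [c] ∉ [[' ', '\t'], ['\n']] := by simp [h3]
        by_cases hb : b = true <;> simp [h1, h2, h3, hm, hb]

theorem pvFoldA (cs : List Char) : ∀ (b : Bool) (tmp acc : List Char),
    (cs.foldl pvStepA (b, tmp, acc)).2.2 = acc ++ pvRender (pvParse cs b tmp) := by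
  induction cs with
  | nil => intro b tmp acc; simp [pvParse, pvRender]
  | cons c r ih =>
    intro b tmp acc
    rw [List.foldl_cons, pvStepA_eval]
    by_cases h1 : c = '<'
    · rw [if_pos h1, ih, show pvParse (c :: r) b tmp = pvParse r true [] by simp [pvParse, h1]]
    · by_cases h2 : c = '>'
      · by_cases h3 : tmp = []
        · rw [if_neg h1, if_pos h2, if_neg (by simpa using h3), ih,
            show pvParse (c :: r) b tmp = (if tmp ≠ [] then [tmp] else []) ++ pvParse r false []
              by simp [pvParse, h1, h2]]
          simp [h3]
        · rw [if_neg h1, if_pos h2, if_pos (by simpa using h3), ih,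
            show pvParse (c :: r) b tmp = (if tmp ≠ [] then [tmp] else []) ++ pvParse r false []
              by simp [pvParse, h1, h2]]
          simp [h3, pvRender]
      · by_cases h4 : b = true ∧ c ≠ '\n'
        · rw [if_neg h1, if_neg h2, if_pos h4, ih,
            show pvParse (c :: r) b tmp = pvParse r b (tmp ++ [c]) by simp [pvParse, h1, h2, h4.1, h4.2]]
        · rw [if_neg h1, if_neg h2, if_neg h4, ih]
          congr 2
          rcases Decidable.not_and_iff_not_or_not.mp h4 with hb | hc
          · have hb' : b = false := by simpa using hb
            subst hb'; simp [pvParse, h1, h2]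
          · have hc' : c = '\n' := by simpa using hc
            subst hc'; simp [pvParse, h1, h2]

theorem pvParse_ne_nil (cs : List Char) : ∀ (b : Bool) (tmp : List Char), [] ∉ pvParse cs b tmp := by
  induction cs with
  | nil => intro b tmp; simp [pvParse]
  | cons c r ih =>
    intro b tmp
    simp only [pvParse]
    split_ifs with h1 h2 h3 h4
    · exact ih _ _
    · simp only [List.mem_append]
      rintro (h | h)
      · simp only [List.mem_singleton] at h; exact h3 h.symm
      · exact ih _ _ h
    · simp only [List.nil_append]; exact ih _ _
    · exact ih _ _
    · exact ih _ _

theorem pvRender_cons (g : List Char) (gs : List (List Char)) :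
    pvRender (g :: gs) = PySem.Chars.join [',', ' '] (g :: gs) ++ [',', ' '] := by
  induction gs generalizing g with
  | nil => simp [pvRender, PySem.Chars.join_singleton]
  | cons g2 gs ih =>
    have h1 : pvRender (g :: g2 :: gs) = g ++ [',', ' '] ++ pvRender (g2 :: gs) := by
      simp [pvRender]
    rw [h1, ih g2, PySem.Chars.join_cons_cons]
    simp

theorem pvJoin_prefix (g : List Char) (gs : List (List Char)) :
    g <+: PySem.Chars.join [',', ' '] (g :: gs) := by
  cases gs with
  | nil => rw [PySem.Chars.join_singleton]
  | cons g2 gs =>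
    rw [PySem.Chars.join_cons_cons]
    exact ⟨[',', ' '] ++ PySem.Chars.join [',', ' '] (g2 :: gs), by simp⟩

theorem pvTrim (gs : List (List Char)) (hne : [] ∉ gs) :
    (if 2 < (pvRender gs).length ∧ PySem.List.slice (pvRender gs) (some (-2)) none = [',', ' ']
     then PySem.List.slice (pvRender gs) none (some (-2)) else pvRender gs)
    = PySem.Chars.join [',', ' '] gs := by
  cases gs with
  | nil => simp [pvRender, PySem.Chars.join_nil]
  | cons g gs =>
    have hg : g ≠ [] := fun h => hne (by simp [h])
    rw [pvRender_cons]
    have hgy : g.length ≤ (PySem.Chars.join [',', ' '] (g :: gs)).length :=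
      (pvJoin_prefix g gs).length_le
    have hglen : 0 < g.length := List.length_pos_iff.mpr hg
    have hlen : (PySem.Chars.join [',', ' '] (g :: gs) ++ [',', ' ']).length
        = (PySem.Chars.join [',', ' '] (g :: gs)).length + 2 := by simp
    have h2 : 2 < (PySem.Chars.join [',', ' '] (g :: gs) ++ [',', ' ']).length := by omega
    have hs1 : PySem.List.slice (PySem.Chars.join [',', ' '] (g :: gs) ++ [',', ' ']) (some (-2)) none
        = [',', ' '] := by
      rw [PySem.List.slice_from_neg_ofNat _ 2 (by omega), hlen]
      simp
    have hs2 : PySem.List.slice (PySem.Chars.join [',', ' '] (g :: gs) ++ [',', ' ']) none (some (-2))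
        = PySem.Chars.join [',', ' '] (g :: gs) := by
      rw [PySem.List.slice_to_neg_ofNat _ 2 (by omega), hlen]
      simp
    rw [if_pos ⟨h2, hs1⟩, hs2]

-- ---- B side ----

theorem pvReplaceGo (l : List Char) : ∀ (fuel : Nat) (acc : List Char), l.length ≤ fuel →
    PySem.Chars.replace.go ['\n'] [] fuel l acc = acc.reverse ++ l.filter (· ≠ '\n') := by
  induction l with
  | nil => intro fuel acc _; cases fuel <;> simp [PySem.Chars.replace.go]
  | cons c t ih =>
    intro fuel acc hf
    cases fuel with
    | zero => simp at hf
    | succ fuel =>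
      have ht : t.length ≤ fuel := by simpa using hf
      by_cases hc : c = '\n'
      · rw [PySem.Chars.replace.go, if_pos (by simp [List.isPrefixOf, hc])]
        have hred : List.drop ['\n'].length (c :: t) = t := by simp
        rw [hred, show ([] : List Char).reverse ++ acc = acc by simp, ih fuel acc ht]
        simp [hc]
      · rw [PySem.Chars.replace.go, if_neg (by simp [List.isPrefixOf]; exact fun h => hc h.symm)]
        rw [ih fuel (c :: acc) ht]
        simp [hc]

theorem pvReplace (xs : List Char) : PySem.Chars.replace xs ['\n'] [] = xs.filter (· ≠ '\n') := by
  rw [PySem.Chars.replace, if_neg (by simp)]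
  simpa using pvReplaceGo xs xs.length [] le_rfl

theorem pvFindGo (seg : List Char) : ∀ (k : Nat), '>' ∈ seg →
    PySem.Chars.find.go ['>'] seg k = ((k : Int) + ((seg.takeWhile (· ≠ '>')).length : Int)) := by
  induction seg with
  | nil => intro k h; simp at h
  | cons c t ih =>
    intro k h
    by_cases hc : c = '>'
    · rw [PySem.Chars.find.go, if_pos (by simp [List.isPrefixOf, hc])]
      simp [hc, List.takeWhile]
    · have ht : '>' ∈ t := by
        rcases List.mem_cons.mp h with h | h
        · exact absurd h.symm hc
        · exact h
      rw [PySem.Chars.find.go,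
        if_neg (by simp [List.isPrefixOf]; exact fun h => hc h.symm),
        ih (k + 1) ht]
      have htw : List.takeWhile (fun x => decide (x ≠ '>')) (c :: t)
          = c :: List.takeWhile (fun x => decide (x ≠ '>')) t := by
        simp [List.takeWhile_cons, hc]
      simp only [ne_eq] at htw ⊢
      rw [htw]
      simp
      push_cast
      ring

theorem pvTakePrefix (seg : List Char) :
    List.take (seg.takeWhile (· ≠ '>')).length seg = seg.takeWhile (· ≠ '>') := by
  induction seg with
  | nil => simp
  | cons c t ih =>
    by_cases hc : c = '>'
    · simp [List.takeWhile_cons, hc]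
    · simp only [ne_eq, decide_not] at ih ⊢
      simp [hc, ih]

theorem pvIsIn (seg : List Char) : PySem.Chars.isIn ['>'] seg = true ↔ '>' ∈ seg := by
  rw [PySem.Chars.isIn_iff_infix]
  exact (List.singleton_infix_iff '>' seg)

theorem pvName (seg : List Char) (h : '>' ∈ seg) :
    PySem.Chars.replace (PySem.List.slice seg none (some (PySem.Chars.find seg ['>']))) ['\n'] []
      = pvFw seg := by
  have hfind : PySem.Chars.find seg ['>'] = ((seg.takeWhile (· ≠ '>')).length : Int) := by
    rw [PySem.Chars.find]
    simpa using pvFindGo seg 0 h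
  rw [hfind, PySem.List.slice_to _ (by positivity)]
  rw [Int.toNat_natCast, pvTakePrefix, pvReplace, pvFw]

theorem pvFoldB (segs : List (List Char)) : ∀ (acc : List (List Char)),
    segs.foldl pvStepB acc = acc ++ segs.flatMap pvG := by
  induction segs with
  | nil => intro acc; simp
  | cons seg segs ih =>
    intro acc
    rw [List.foldl_cons]
    by_cases h : '>' ∈ seg
    · rw [show pvStepB acc seg = (if pvFw seg ≠ [] then acc ++ [pvFw seg] else acc) by
        unfold pvStepB
        rw [if_pos ((pvIsIn seg).mpr h)]
        simp only [pvName seg h]]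
      by_cases hn : pvFw seg = []
      · rw [if_neg (by simpa using hn), ih]
        simp [pvG, pvGd, h, hn]
      · rw [if_pos (by simpa using hn), ih]
        simp [pvG, pvGd, h, hn]
    · have hf : PySem.Chars.isIn ['>'] seg = false := by
        rcases Bool.eq_false_or_eq_true (PySem.Chars.isIn ['>'] seg) with hh | hh
        · exact absurd ((pvIsIn seg).mp hh) h
        · exact hh
      rw [show pvStepB acc seg = acc by unfold pvStepB; rw [if_neg (by simp [hf])], ih]
      simp [pvG, h]

-- ---- the split/parse correspondence ----

theorem pvParse_lt (r : List Char) (b : Bool) (tmp : List Char) :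
    pvParse ('<' :: r) b tmp = pvParse r true [] := by simp [pvParse]

theorem pvParse_gt (r : List Char) (b : Bool) (tmp : List Char) :
    pvParse ('>' :: r) b tmp = (if tmp ≠ [] then [tmp] else []) ++ pvParse r false [] := by
  simp [pvParse]

theorem pvParse_other (c : Char) (r : List Char) (b : Bool) (tmp : List Char)
    (h1 : c ≠ '<') (h2 : c ≠ '>') :
    pvParse (c :: r) b tmp = if b = true ∧ c ≠ '\n' then pvParse r b (tmp ++ [c]) else pvParse r b tmp := by
  by_cases h4 : b = true ∧ c ≠ '\n'
  · simp [pvParse, h1, h2, h4.1, h4.2]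
  · rw [if_neg h4]
    rcases Decidable.not_and_iff_not_or_not.mp h4 with hb | hc
    · have hb' : b = false := by simpa using hb
      subst hb'; simp [pvParse, h1, h2]
    · have hc' : c = '\n' := by simpa using hc
      subst hc'; simp [pvParse, h1, h2]

theorem pvMain (cs : List Char) :
    (pvParse cs false [] = ((cs.splitOn '<').drop 1).flatMap pvG) ∧
    (∀ (tmp h : List Char) (t : List (List Char)), cs.splitOn '<' = h :: t →
      pvParse cs true tmp = (if '>' ∈ h then pvGd (tmp ++ pvFw h) else []) ++ t.flatMap pvG) := by
  induction cs with
  | nil =>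
    constructor
    · simp [pvParse, List.splitOn, List.splitOnP_nil]
    · intro tmp h t hst
      simp only [List.splitOn, List.splitOnP_nil, List.cons.injEq] at hst
      simp [pvParse, hst.1.symm, hst.2.symm]
  | cons c r ih =>
    obtain ⟨ihA, ihB⟩ := ih
    obtain ⟨h', t', hst'⟩ : ∃ h' t', r.splitOn '<' = h' :: t' :=
      List.exists_cons_of_ne_nil (List.splitOnP_ne_nil _ r)
    by_cases hc : c = '<'
    · have hsp : (c :: r).splitOn '<' = [] :: r.splitOn '<' := by
        simp [List.splitOn, List.splitOnP_cons, hc]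
      subst hc
      constructor
      · rw [hsp, List.drop_succ_cons, List.drop_zero, hst', List.flatMap_cons,
          pvParse_lt, ihB [] h' t' hst']
        simp [pvG]
      · intro tmp h t hst
        rw [hsp] at hst
        obtain ⟨hh, ht⟩ := List.cons.inj hst
        rw [pvParse_lt, ← hh, ← ht, hst', List.flatMap_cons, ihB [] h' t' hst']
        simp [pvG]
    · have hmod : (c :: r).splitOn '<' = (c :: h') :: t' := by
        simp only [List.splitOn, List.splitOnP_cons] at hst' ⊢
        rw [if_neg (by simp [hc]), hst']
        rfl
      constructor
      · rw [hmod, List.drop_succ_cons, List.drop_zero]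
        by_cases hg : c = '>'
        · subst hg
          rw [pvParse_gt, ihA, hst', List.drop_succ_cons, List.drop_zero]
          simp
        · rw [pvParse_other c r false [] hc hg, if_neg (by simp), ihA, hst',
            List.drop_succ_cons, List.drop_zero]
      · intro tmp h t hst
        rw [hmod] at hst
        obtain ⟨hh, ht⟩ := List.cons.inj hst
        subst ht
        rw [← hh]
        by_cases hg : c = '>'
        · subst hg
          rw [pvParse_gt, ihA, hst', List.drop_succ_cons, List.drop_zero]
          have hfw : pvFw ('>' :: h') = [] := by simp [pvFw, List.takeWhile_cons]
          rw [if_pos (show ('>' : Char) ∈ '>' :: h' by simp), hfw, List.append_nil]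
          by_cases h0 : tmp = []
          · simp [pvGd, h0]
          · simp [pvGd, h0]
        · by_cases hn : c = '\n'
          · subst hn
            rw [pvParse_other _ r true tmp hc hg, if_neg (by simp), ihB tmp h' t' hst']
            have hfw : pvFw ('\n' :: h') = pvFw h' := by
              simp [pvFw, List.takeWhile_cons]
            rw [hfw]
            have hgt : ('>' ∈ ('\n' : Char) :: h') ↔ ('>' ∈ h') := by simp
            by_cases hm : '>' ∈ h'
            · rw [if_pos (hgt.mpr hm), if_pos hm]
            · rw [if_neg (fun hx => hm (hgt.mp hx)), if_neg hm]
          · rw [pvParse_other c r true tmp hc hg, if_pos ⟨rfl, hn⟩, ihB (tmp ++ [c]) h' t' hst']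
            have hfw : pvFw (c :: h') = c :: pvFw h' := by
              simp [pvFw, List.takeWhile_cons, hg, hn]
            rw [hfw]
            have hgt : ('>' ∈ c :: h') ↔ ('>' ∈ h') := by
              simp only [List.mem_cons]
              constructor
              · rintro (hx | hx)
                · exact absurd hx.symm hg
                · exact hx
              · exact fun hx => Or.inr hx
            by_cases hm : '>' ∈ h'
            · rw [if_pos (hgt.mpr hm), if_pos hm]
              simp [pvGd]
            · rw [if_neg (fun hx => hm (hgt.mp hx)), if_neg hm]

-- ===== VERDICT (by name: the statement is the Claim_ definition above) =====
theorem extract_params_from_uri_spec : Claim_equal_extract_params_from_uri := by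
  intro route_path _
  unfold Spec_extract_params_from_uri extract_params_from_uri extract_params_from_uri_alt
  simp only
  rw [pvFoldA route_path.toList false [] [], List.nil_append,
    pvTrim _ (pvParse_ne_nil route_path.toList false []),
    pvFoldB ((route_path.toList.splitOn '<').drop 1) [], List.nil_append,
    (pvMain route_path.toList).1]
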